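-- pv_equiv track=rewrite | github.com/Lord0fTurk/RPGMLocalizer | src/core/parsers/js_tokenizer.py | _skip_regex_literal
-- ===== SOURCE A (Python) =====
-- def _skip_regex_literal(js_code: str, slash_index: int) -> int:
--     """Skip a regex literal, including character classes and flags."""
--     i = slash_index + 1
--     length = len(js_code)
--     in_class = False
--
--     while i < length:
--         ch = js_code[i]
--         if ch == '\\':
--             i += 2
--             continue
--         if ch == '[':
--             in_class = True
--         elif ch == ']' and in_class:
--             in_class = False
--         elif ch == '/' and not in_class:
--             i += 1
--             while i < length and js_code[i].isalpha():
--                 i += 1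
--             return i
--         i += 1
--
--     return length
-- ===== SOURCE B (Python) =====
-- import re
--
-- # The whole regex-literal body as one possessive (non-backtracking) pattern:
-- #   \\.          an escaped character (DOTALL so newline counts too)
-- #   \[(?:\\.|[^\]])*+\]   a whole character class
-- #   [^/\\[]      any other ordinary character
-- # repeated possessively, then the closing '/'.
-- _BODY = re.compile(r'(?s)(?:\\.|\[(?:\\.|[^\]])*+\]|[^/\\[])*+/')
--
--
-- def _skip_regex_literal(js_code: str, slash_index: int) -> int:
--     """Skip a regex literal, including character classes and flags."""
--     m = _BODY.match(js_code, slash_index + 1)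
--     if m is None:
--         return len(js_code)  # unterminated literal
--     i = m.end()
--     n = len(js_code)
--     while i < n and js_code[i].isalpha():
--         i += 1
--     return i
-- ===== Notes on version B (the rewrite author's own statement) =====
-- stated objective: idiomatic
-- what changed: B matches the whole literal body declaratively with one compiled possessive regular expression (re.match anchored at slash_index+1) and keeps only a small trailing-flags loop, replacing A's hand-rolled character-by-character state machine with an in_class flag; the C regex engine gives a constant-factor speedup.
-- outside the precondition, e.g. on _skip_regex_literal('/', -2): A returns 0, B returns 1; on _skip_regex_literal('ab/', -3): A returns 2, B returns 3
import Mathlib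
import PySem

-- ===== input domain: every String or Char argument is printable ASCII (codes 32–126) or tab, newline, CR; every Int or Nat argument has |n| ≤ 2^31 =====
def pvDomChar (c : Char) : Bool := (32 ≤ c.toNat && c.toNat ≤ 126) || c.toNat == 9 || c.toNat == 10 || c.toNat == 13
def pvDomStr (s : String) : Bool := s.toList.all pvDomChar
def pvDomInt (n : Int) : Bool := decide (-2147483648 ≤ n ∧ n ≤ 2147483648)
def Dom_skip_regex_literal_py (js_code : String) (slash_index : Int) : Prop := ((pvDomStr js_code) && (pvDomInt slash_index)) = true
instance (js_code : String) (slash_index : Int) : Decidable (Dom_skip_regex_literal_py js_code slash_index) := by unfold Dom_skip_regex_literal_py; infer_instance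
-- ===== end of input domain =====

-- B matches the whole regex-literal body with one compiled possessive regular expression
-- and keeps only a trailing-flags loop, replacing A's hand-rolled state machine (idiomatic).


-- ===== PORT A =====
-- cited by every port's decreasing_by (keeps the recursion measures tiny)
theorem pvDecStep (L i k : Int) (h : i < L) (hk : 0 < k) : (L - (i + k)).toNat < (L - i).toNat := by
  omega

-- A's inner flag loop: while i < length and js_code[i].isalpha(): i += 1
def pvFlagsA (cs : List Char) (i : Int) : Int :=
  if _h : i < (cs.length : Int) then
    match PySem.List.pyGet? cs i with
    | none => 0  -- unreachable: this loop is only entered with 0 ≤ i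
    | some ch => if PySem.Chars.isalpha ch then pvFlagsA cs (i + 1) else i
  else i
termination_by ((cs.length : Int) - i).toNat
decreasing_by exact pvDecStep _ _ _ _h zero_lt_one

-- A's main while loop, carrying the in_class flag
def pvLoopA (cs : List Char) (i : Int) (in_class : Bool) : Int :=
  if _h : i < (cs.length : Int) then
    match PySem.List.pyGet? cs i with
    | none => 0  -- unreachable under Pre_: Python raises IndexError here
    | some ch =>
      if ch = '\\' then pvLoopA cs (i + 2) in_class
      else if ch = '[' then pvLoopA cs (i + 1) true
      else if ch = ']' ∧ in_class = true then pvLoopA cs (i + 1) false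
      else if ch = '/' ∧ in_class = false then pvFlagsA cs (i + 1)
      else pvLoopA cs (i + 1) in_class
  else (cs.length : Int)
termination_by ((cs.length : Int) - i).toNat
decreasing_by
  · exact pvDecStep _ _ _ _h zero_lt_two
  · exact pvDecStep _ _ _ _h zero_lt_one
  · exact pvDecStep _ _ _ _h zero_lt_one
  · exact pvDecStep _ _ _ _h zero_lt_one

def skip_regex_literal_py (js_code : String) (slash_index : Int) : Int :=
  pvLoopA js_code.toList (slash_index + 1) false

-- ===== PORT B =====
-- Hand port of Source B's fixed possessive pattern r'(?s)(?:\\.|\[(?:\\.|[^\]])*+\]|[^/\\[])*+/':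
-- possessive quantifiers never backtrack and the alternatives are tried in order, so the
-- engine's behaviour on this pattern is exactly the deterministic left-to-right scan below.

-- the character-class alternative \[(?:\\.|[^\]])*+\] , entered just after the '[':
-- returns the position past the closing ']' or none if the alternative fails
def pvClassB (cs : List Char) (i : Int) : Option Int :=
  if _h : i < (cs.length : Int) then
    match PySem.List.pyGet? cs i with
    | none => none  -- unreachable: match position is clamped to 0 ≤ i
    | some c =>
      if c = '\\' then
        if i + 1 < (cs.length : Int) then pvClassB cs (i + 2)
        else none  -- '\\.' needs a character after the backslash; '[^\]]' then leaves ']' unmatched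
      else if c = ']' then some (i + 1)
      else pvClassB cs (i + 1)
  else none  -- end of input: '\]' cannot match
termination_by ((cs.length : Int) - i).toNat
decreasing_by
  · exact pvDecStep _ _ _ _h zero_lt_two
  · exact pvDecStep _ _ _ _h zero_lt_one

-- cited by pvBodyB's decreasing_by
theorem pvClassB_gt (cs : List Char) (i : Int) :
    ∀ j, pvClassB cs i = some j → i < j := by
  intro j hj
  rw [pvClassB] at hj
  split at hj
  · cases hg : PySem.List.pyGet? cs i with
    | none => rw [hg] at hj; exact absurd hj (by simp)
    | some c =>
      rw [hg] at hj; dsimp only at hj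
      by_cases h1 : c = '\\'
      · rw [if_pos h1] at hj
        by_cases h2 : i + 1 < (cs.length : Int)
        · rw [if_pos h2] at hj
          have := pvClassB_gt cs (i + 2) j hj; omega
        · rw [if_neg h2] at hj; exact absurd hj (by simp)
      · rw [if_neg h1] at hj
        by_cases h3 : c = ']'
        · rw [if_pos h3] at hj
          have : i + 1 = j := by injection hj
          omega
        · rw [if_neg h3] at hj
          have := pvClassB_gt cs (i + 1) j hj; omega
  · exact absurd hj (by simp)
termination_by ((cs.length : Int) - i).toNat
decreasing_by
  · exact pvDecStep _ _ _ (by assumption) zero_lt_two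
  · exact pvDecStep _ _ _ (by assumption) zero_lt_one

-- the whole anchored match: the outer possessive star over the three alternatives,
-- then the closing '/'; returns the end of the match or none
def pvBodyB (cs : List Char) (i : Int) : Option Int :=
  if _h : i < (cs.length : Int) then
    match PySem.List.pyGet? cs i with
    | none => none  -- unreachable: match position is clamped to 0 ≤ i
    | some c =>
      if c = '/' then some (i + 1)  -- no alternative matches '/': the star stops, '/' matches
      else if c = '\\' then
        if i + 1 < (cs.length : Int) then pvBodyB cs (i + 2)
        else none  -- trailing backslash: no alternative matches it, then '/' fails
      else if c = '[' then
        if _hc : (pvClassB cs (i + 1)).isSome then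
          pvBodyB cs ((pvClassB cs (i + 1)).get _hc)
        else none  -- class fails; '[' matches no other alternative, then '/' fails
      else pvBodyB cs (i + 1)
  else none  -- '/' cannot match at end of input
termination_by ((cs.length : Int) - i).toNat
decreasing_by
  · exact pvDecStep _ _ _ _h zero_lt_two
  · have := pvClassB_gt cs (i + 1) _ (Option.some_get _hc).symm
    omega
  · exact pvDecStep _ _ _ _h zero_lt_one

-- B's trailing-flags loop
def pvFlagsB (cs : List Char) (i : Int) : Int :=
  if _h : i < (cs.length : Int) then
    match PySem.List.pyGet? cs i with
    | none => i  -- unreachable: the match end is ≥ 0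
    | some c => if PySem.Chars.isalpha c then pvFlagsB cs (i + 1) else i
  else i
termination_by ((cs.length : Int) - i).toNat
decreasing_by exact pvDecStep _ _ _ _h zero_lt_one

def skip_regex_literal_py_alt (js_code : String) (slash_index : Int) : Int :=
  let cs := js_code.toList
  -- re.match(js_code, pos) clamps a negative pos to 0
  match pvBodyB cs (max (slash_index + 1) 0) with
  | none => (cs.length : Int)
  | some e => pvFlagsB cs e

-- ===== PRECONDITION & SPEC =====
-- Pre_ excludes negative start positions (slash_index + 1 < 0): below -len A raises
-- IndexError on the first read, and in [-len, -1] A scans from Python's negative-index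
-- wraparound position while B's re.match clamps the start to 0 — an accidental corner
-- (no caller hands a tokenizer a negative slash position) on which neither value is specified.
def Pre_skip_regex_literal_py (js_code : String) (slash_index : Int) : Prop :=
  0 ≤ slash_index + 1
instance (js_code : String) (slash_index : Int) : Decidable (Pre_skip_regex_literal_py js_code slash_index) := by unfold Pre_skip_regex_literal_py; infer_instance

def pvWitness_skip_regex_literal_py : String × Int := ("var r = /a[/b]*c/gi;", 8)

def Spec_skip_regex_literal_py (js_code : String) (slash_index : Int) (out : Int) : Prop := out = skip_regex_literal_py_alt js_code slash_index
instance (js_code : String) (slash_index : Int) (out : Int) : Decidable (Spec_skip_regex_literal_py js_code slash_index out) := by unfold Spec_skip_regex_literal_py; infer_instance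

-- ===== CLAIM (what is proved, stated in full; the proofs are below) =====
def Claim_equal_skip_regex_literal_py : Prop := ∀ (js_code : String) (slash_index : Int), Dom_skip_regex_literal_py js_code slash_index → Pre_skip_regex_literal_py js_code slash_index → Spec_skip_regex_literal_py js_code slash_index (skip_regex_literal_py js_code slash_index)

-- ===== LEMMAS AND PROOFS =====

-- the two flag scanners agree on every nonnegative start index
theorem pvFlags_eq (cs : List Char) (i : Int) (hge : 0 ≤ i) :
    pvFlagsA cs i = pvFlagsB cs i := by
  rw [pvFlagsA, pvFlagsB]
  split
  · rename_i hlt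
    cases hg : PySem.List.pyGet? cs i with
    | none =>
      exfalso
      rw [PySem.List.pyGet?_eq_none_iff] at hg
      exact hg ⟨by omega, hlt⟩
    | some c =>
      dsimp only
      split_ifs
      · exact pvFlags_eq cs (i + 1) (by omega)
      · rfl
  · rfl
termination_by ((cs.length : Int) - i).toNat
decreasing_by exact pvDecStep _ _ _ (by assumption) zero_lt_one

-- finishing step shared by both sides of the invariant
def pvFinishB (cs : List Char) (o : Option Int) : Int :=
  match o with
  | none => (cs.length : Int)
  | some e => pvFlagsB cs e

-- main invariant: A's loop outside a class is the regex body match (finished with the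
-- flags loop, or length on failure), and A's loop inside a class is the body match
-- resumed where the class alternative ends (length if the class alternative fails)
theorem pvLoop_eq (cs : List Char) (fuel : Nat) :
    ∀ i : Int, ((cs.length : Int) - i).toNat ≤ fuel → 0 ≤ i →
      pvLoopA cs i false = pvFinishB cs (pvBodyB cs i) ∧
      pvLoopA cs i true = pvFinishB cs ((pvClassB cs i).bind (pvBodyB cs)) := by
  induction fuel with
  | zero =>
    intro i hf hge
    have hnot : ¬ i < (cs.length : Int) := by omega
    have hC0 : pvClassB cs i = none := by rw [pvClassB]; simp [hnot]
    constructor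
    · rw [pvLoopA, pvBodyB]; simp [hnot, pvFinishB]
    · rw [pvLoopA, hC0]; simp [hnot, pvFinishB]
  | succ fuel ih =>
    intro i hf hge
    by_cases hlt : i < (cs.length : Int)
    case neg =>
      have hC0 : pvClassB cs i = none := by rw [pvClassB]; simp [hlt]
      constructor
      · rw [pvLoopA, pvBodyB]; simp [hlt, pvFinishB]
      · rw [pvLoopA, hC0]; simp [hlt, pvFinishB]
    case pos =>
      cases hg : PySem.List.pyGet? cs i with
      | none =>
        exfalso
        rw [PySem.List.pyGet?_eq_none_iff] at hg
        exact hg ⟨by omega, hlt⟩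
      | some c =>
        -- one-step unfoldings of the four loops at position i
        have hA : ∀ b, pvLoopA cs i b =
            (if c = '\\' then pvLoopA cs (i + 2) b
             else if c = '[' then pvLoopA cs (i + 1) true
             else if c = ']' ∧ b = true then pvLoopA cs (i + 1) false
             else if c = '/' ∧ b = false then pvFlagsA cs (i + 1)
             else pvLoopA cs (i + 1) b) := by
          intro b; rw [pvLoopA]; simp only [dif_pos hlt, hg]
        have hB : pvBodyB cs i =
            (if c = '/' then some (i + 1)
             else if c = '\\' then
               if i + 1 < (cs.length : Int) then pvBodyB cs (i + 2) else none
             else if c = '[' then (pvClassB cs (i + 1)).bind (pvBodyB cs)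
             else pvBodyB cs (i + 1)) := by
          rw [pvBodyB]; simp only [dif_pos hlt, hg]
          by_cases hs : c = '/'
          · simp [hs]
          by_cases hbs : c = '\\'
          · simp [hs, hbs]
          by_cases hbr : c = '['
          · simp only [hs, hbs, hbr, if_true, if_false]
            cases hcj : pvClassB cs (i + 1) with
            | none => simp [hcj]
            | some j => simp [hcj]
          · simp [hs, hbs, hbr]
        have hC : pvClassB cs i =
            (if c = '\\' then
               if i + 1 < (cs.length : Int) then pvClassB cs (i + 2) else none
             else if c = ']' then some (i + 1)
             else pvClassB cs (i + 1)) := by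
          rw [pvClassB]; simp only [dif_pos hlt, hg]
        by_cases h1 : c = '\\'
        · by_cases h2 : i + 1 < (cs.length : Int)
          · have := ih (i + 2) (by omega) (by omega)
            constructor
            · rw [hA, hB]; simp [h1, h2]; exact this.1
            · rw [hA, hC]; simp [h1, h2]; exact this.2
          · -- backslash is the last character: A overshoots past the end, the pattern fails
            have hA2 : ∀ b, pvLoopA cs (i + 2) b = (cs.length : Int) := by
              intro b; rw [pvLoopA]; simp [show ¬ i + 2 < (cs.length : Int) by omega]
            constructor
            · rw [hA, hB]; simp [h1, h2, pvFinishB, hA2]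
            · rw [hA, hC]; simp [h1, h2, pvFinishB, hA2]
        by_cases h2 : c = '['
        · have := ih (i + 1) (by omega) (by omega)
          constructor
          · rw [hA, hB]; simp [h1, h2]; exact this.2
          · rw [hA, hC]; simp [h1, h2]; exact this.2
        by_cases h3 : c = ']'
        · have := ih (i + 1) (by omega) (by omega)
          constructor
          · rw [hA, hB]; simp [h1, h2, h3]; exact this.1
          · rw [hA, hC]; simp [h1, h3, pvFinishB]; exact this.1
        by_cases h4 : c = '/'
        · have := ih (i + 1) (by omega) (by omega)
          constructor
          · rw [hA, hB]; simp [h1, h2, h4, pvFinishB]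
            exact pvFlags_eq cs (i + 1) (by omega)
          · rw [hA, hC]; simp [h1, h3, h4]; exact this.2
        · have := ih (i + 1) (by omega) (by omega)
          constructor
          · rw [hA, hB]; simp [h1, h2, h3, h4]; exact this.1
          · rw [hA, hC]; simp [h1, h3, h4]; exact this.2

-- ===== VERDICT (by name: the statements are the Claim_ definitions above) =====
theorem skip_regex_literal_py_spec : Claim_equal_skip_regex_literal_py := by
  intro js_code slash_index _hdom hpre
  unfold Spec_skip_regex_literal_py skip_regex_literal_py skip_regex_literal_py_alt
  have hpre' : (0 : Int) ≤ slash_index + 1 := hpre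
  have hmax : max (slash_index + 1) 0 = slash_index + 1 := by omega
  rw [hmax]
  have h := (pvLoop_eq js_code.toList (((js_code.toList.length : Int) - (slash_index + 1)).toNat)
    (slash_index + 1) le_rfl hpre').1
  rw [h]
  cases hpb : pvBodyB js_code.toList (slash_index + 1) <;> simp [pvFinishB, hpb]
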